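-- pv_equiv track=rewrite | github.com/AyaPK/advent-of-code | 2015/day3/part2.py | deliver
-- ===== SOURCE A (Python) =====
-- def deliver(inp):
--     sx, sy = 0, 0
--     rx, ry = 0, 0
--     arr = [(0, 0)]
--     turn = "robo"
--     for dir in inp:
--         if dir == "^":
--             if turn == "santa":
--                 sx -= 1
--             else:
--                 rx -= 1
--         elif dir == "v":
--             if turn == "santa":
--                 sx += 1
--             else:
--                 rx += 1
--         elif dir == ">":
--             if turn == "santa":
--                 sy += 1
--             else:
--                 ry += 1
--         else:
--             if turn == "santa":
--                 sy -= 1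
--             else:
--                 ry -= 1
--
--         if turn == "robo":
--             arr.append((rx, ry))
--             turn = "santa"
--         else:
--             arr.append((sx, sy))
--             turn = "robo"
--     return len(set(arr))
-- ===== SOURCE B (Python) =====
-- def _move(c, x, y):
--     if c == "^":
--         return x - 1, y
--     if c == "v":
--         return x + 1, y
--     if c == ">":
--         return x, y + 1
--     return x, y - 1
--
--
-- def _walk(moves):
--     x, y = 0, 0
--     seen = set()
--     for c in moves:
--         x, y = _move(c, x, y)
--         seen.add((x, y))
--     return seen
--
--
-- def _split(s):
--     robo, santa = [], []
--     i, n = 0, len(s)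
--     while i < n:
--         robo.append(s[i])
--         if i + 1 < n:
--             santa.append(s[i + 1])
--         i += 2
--     return robo, santa
--
--
-- def deliver(inp):
--     robo, santa = _split(inp)
--     return len({(0, 0)} | _walk(robo) | _walk(santa))
-- ===== Notes on version B (the rewrite author's own statement) =====
-- stated objective: alternative
-- what changed: Replaces the single interleaved walk with a turn flag and a growing list by splitting the input into even/odd index move lists, walking each agent independently into its own set, and taking the size of the union with the origin.
import Mathlib
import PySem

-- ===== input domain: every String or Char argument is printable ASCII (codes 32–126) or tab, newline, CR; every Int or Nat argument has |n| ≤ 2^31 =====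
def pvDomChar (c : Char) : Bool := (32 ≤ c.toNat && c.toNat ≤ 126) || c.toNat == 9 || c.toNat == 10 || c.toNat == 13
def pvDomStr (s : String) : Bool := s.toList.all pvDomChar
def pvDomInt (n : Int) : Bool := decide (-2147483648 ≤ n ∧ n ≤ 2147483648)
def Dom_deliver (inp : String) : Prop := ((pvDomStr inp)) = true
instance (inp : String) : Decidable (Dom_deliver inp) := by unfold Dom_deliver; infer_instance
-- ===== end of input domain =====

-- B replaces A's interleaved turn-flag walk by two independent per-agent walks over the
-- even-index and odd-index moves; same return value, no speed claim (objective: alternative).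

-- ===== PORT A =====
-- the for-loop of A: state (sx,sy,rx,ry,arr,turn), branches in A's order
def deliverLoop : List Char → Int → Int → Int → Int → List (Int × Int) → String → List (Int × Int)
  | [], _, _, _, _, arr, _ => arr
  | d :: rest, sx, sy, rx, ry, arr, turn =>
    let st : Int × Int × Int × Int :=
      if d = '^' then
        (if turn == "santa" then (sx - 1, sy, rx, ry) else (sx, sy, rx - 1, ry))
      else if d = 'v' then
        (if turn == "santa" then (sx + 1, sy, rx, ry) else (sx, sy, rx + 1, ry))
      else if d = '>' then
        (if turn == "santa" then (sx, sy + 1, rx, ry) else (sx, sy, rx, ry + 1))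
      else
        (if turn == "santa" then (sx, sy - 1, rx, ry) else (sx, sy, rx, ry - 1))
    match st with
    | (sx', sy', rx', ry') =>
      if turn == "robo" then deliverLoop rest sx' sy' rx' ry' (arr ++ [(rx', ry')]) "santa"
      else deliverLoop rest sx' sy' rx' ry' (arr ++ [(sx', sy')]) "robo"

def deliver (inp : String) : Int :=
  ((PySem.Set.ofList (deliverLoop inp.toList 0 0 0 0 [((0 : Int), (0 : Int))] "robo")).length : Int)

-- ===== PORT B =====
-- _move from Source B
def pvMove (c : Char) (p : Int × Int) : Int × Int :=
  if c = '^' then (p.1 - 1, p.2)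
  else if c = 'v' then (p.1 + 1, p.2)
  else if c = '>' then (p.1, p.2 + 1)
  else (p.1, p.2 - 1)

-- the for-loop of _walk from Source B
def pvWalk : List Char → Int × Int → PySem.Set (Int × Int) → PySem.Set (Int × Int)
  | [], _, seen => seen
  | c :: rest, p, seen =>
    let p' := pvMove c p
    pvWalk rest p' (PySem.Set.add seen p')

-- _split from Source B: the while loop consumes two characters per iteration
def pvSplit : List Char → List Char × List Char
  | [] => ([], [])
  | [a] => ([a], [])
  | a :: b :: t =>
    let rs := pvSplit t
    (a :: rs.1, b :: rs.2)

def deliver_alt (inp : String) : Int :=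
  let rs := pvSplit inp.toList
  ((PySem.Set.union
      (PySem.Set.union (PySem.Set.ofList [((0 : Int), (0 : Int))])
        (pvWalk rs.1 (0, 0) PySem.Set.empty))
      (pvWalk rs.2 (0, 0) PySem.Set.empty)).length : Int)

-- ===== PRECONDITION & SPEC =====
def Spec_deliver (inp : String) (out : Int) : Prop := out = deliver_alt inp
instance (inp : String) (out : Int) : Decidable (Spec_deliver inp out) := by unfold Spec_deliver; infer_instance

-- ===== CLAIM (what is proved, stated in full; the proofs are below) =====
def Claim_equal_deliver : Prop := ∀ (inp : String), Dom_deliver inp → Spec_deliver inp (deliver inp)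

-- ===== LEMMAS AND PROOFS =====

-- positions visited along a list of moves, starting from p (p itself excluded)
def pvPath : List Char → Int × Int → List (Int × Int)
  | [], _ => []
  | c :: t, p =>
    let p' := pvMove c p
    p' :: pvPath t p'

-- r0 :: s0 :: r1 :: s1 :: … — the order A appends to arr
def pvInterleave : List (Int × Int) → List (Int × Int) → List (Int × Int)
  | [], ys => ys
  | x :: xs, ys => x :: pvInterleave ys xs
termination_by xs ys => xs.length + ys.length
decreasing_by simp; omega

lemma mem_pvInterleave (z : Int × Int) : ∀ (xs ys : List (Int × Int)),
    z ∈ pvInterleave xs ys ↔ z ∈ xs ∨ z ∈ ys := by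
  intro xs ys
  fun_induction pvInterleave xs ys with
  | case1 ys => simp
  | case2 x xs ys ih => simp [ih]; tauto

lemma deliverLoop_cons_robo (d : Char) (rest : List Char) (sx sy rx ry : Int)
    (arr : List (Int × Int)) :
    deliverLoop (d :: rest) sx sy rx ry arr "robo" =
      deliverLoop rest sx sy (pvMove d (rx, ry)).1 (pvMove d (rx, ry)).2
        (arr ++ [pvMove d (rx, ry)]) "santa" := by
  have h1 : ("robo" == "santa") = false := rfl
  have h2 : ("robo" == "robo") = true := rfl
  simp only [deliverLoop, pvMove, h1, h2, Bool.false_eq_true, if_false, if_true]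
  split_ifs <;> rfl

lemma deliverLoop_cons_santa (d : Char) (rest : List Char) (sx sy rx ry : Int)
    (arr : List (Int × Int)) :
    deliverLoop (d :: rest) sx sy rx ry arr "santa" =
      deliverLoop rest (pvMove d (sx, sy)).1 (pvMove d (sx, sy)).2 rx ry
        (arr ++ [pvMove d (sx, sy)]) "robo" := by
  have h1 : ("santa" == "santa") = true := rfl
  have h2 : ("santa" == "robo") = false := rfl
  simp only [deliverLoop, pvMove, h1, h2, Bool.false_eq_true, if_false, if_true]
  split_ifs <;> rfl

lemma deliverLoop_eq : ∀ (l : List Char) (sx sy rx ry : Int) (arr : List (Int × Int)),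
    deliverLoop l sx sy rx ry arr "robo" =
      arr ++ pvInterleave (pvPath (pvSplit l).1 (rx, ry)) (pvPath (pvSplit l).2 (sx, sy)) := by
  intro l
  induction l using pvSplit.induct with
  | case1 =>
    intro sx sy rx ry arr
    simp [deliverLoop, pvSplit, pvPath, pvInterleave]
  | case2 a =>
    intro sx sy rx ry arr
    rw [deliverLoop_cons_robo]
    simp [deliverLoop, pvSplit, pvPath, pvInterleave]
  | case3 a b t ih =>
    intro sx sy rx ry arr
    rw [deliverLoop_cons_robo, deliverLoop_cons_santa, ih]
    simp [pvSplit, pvPath, pvInterleave]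

lemma mem_pvWalk (z : Int × Int) : ∀ (l : List Char) (p : Int × Int)
    (seen : PySem.Set (Int × Int)),
    z ∈ pvWalk l p seen ↔ z ∈ seen ∨ z ∈ pvPath l p := by
  intro l
  induction l with
  | nil => intro p seen; simp [pvWalk, pvPath]
  | cons c t ih =>
    intro p seen
    simp only [pvWalk, pvPath, ih, PySem.Set.mem_add, List.mem_cons]
    tauto

theorem deliver_eq_alt (inp : String) : deliver inp = deliver_alt inp := by
  unfold deliver deliver_alt
  rw [deliverLoop_eq]
  congr 1
  have hmemA : ∀ z : Int × Int,
      z ∈ PySem.Set.ofList ([((0 : Int), (0 : Int))] ++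
        pvInterleave (pvPath (pvSplit inp.toList).1 (0, 0)) (pvPath (pvSplit inp.toList).2 (0, 0)))
      ↔ z = ((0 : Int), (0 : Int)) ∨ z ∈ pvPath (pvSplit inp.toList).1 (0, 0)
          ∨ z ∈ pvPath (pvSplit inp.toList).2 (0, 0) := by
    intro z
    simp [PySem.Set.mem_ofList, mem_pvInterleave]
  have hmemB : ∀ z : Int × Int,
      z ∈ PySem.Set.union
            (PySem.Set.union (PySem.Set.ofList [((0 : Int), (0 : Int))])
              (pvWalk (pvSplit inp.toList).1 (0, 0) PySem.Set.empty))
            (pvWalk (pvSplit inp.toList).2 (0, 0) PySem.Set.empty)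
      ↔ z = ((0 : Int), (0 : Int)) ∨ z ∈ pvPath (pvSplit inp.toList).1 (0, 0)
          ∨ z ∈ pvPath (pvSplit inp.toList).2 (0, 0) := by
    intro z
    simp [PySem.Set.mem_union, PySem.Set.mem_ofList, mem_pvWalk, PySem.Set.empty]
    tauto
  have hA : (PySem.Set.ofList ([((0 : Int), (0 : Int))] ++
      pvInterleave (pvPath (pvSplit inp.toList).1 (0, 0))
        (pvPath (pvSplit inp.toList).2 (0, 0)))).Nodup := PySem.Set.nodup_ofList _
  have hB : (PySem.Set.union
      (PySem.Set.union (PySem.Set.ofList [((0 : Int), (0 : Int))])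
        (pvWalk (pvSplit inp.toList).1 (0, 0) PySem.Set.empty))
      (pvWalk (pvSplit inp.toList).2 (0, 0) PySem.Set.empty)).Nodup := by
    apply PySem.Set.nodup_union
    apply PySem.Set.nodup_union
    exact PySem.Set.nodup_ofList _
  refine List.Perm.length_eq ?_
  refine (List.perm_ext_iff_of_nodup hA hB).mpr ?_
  intro z
  rw [hmemA, hmemB]

-- ===== VERDICT (by name: the statement is the Claim_ definition above) =====
theorem deliver_spec : Claim_equal_deliver := by
  intro inp _
  unfold Spec_deliver
  exact deliver_eq_alt inp
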